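-- pv_equiv track=rewrite | github.com/yeimyhs/LabADAGrupoBYeimyHuanca | NinthClass/4viciousPikeman.py | solveProblems
-- ===== SOURCE A (Python) =====
-- def solveProblems(n, givenTime, timeSolve):
--     totalTime, penalty = 0, 0
--     #variable del tiempo y penalizacion
--     for i, t in enumerate(timeSolve):
--         #iteramos en la lista
--         if (totalTime + t) > givenTime:
--             #si el tiempo total mas el tiempo que tardamos en resolver el ejercicio es mayor al tiempo maximo del concurso
--             return i, penalty
--         #retorna la cantidad de ejercicios
--         totalTime += t
--         #agrega el tiempo de la iteracion
--         penalty = (penalty + totalTime) % 1000000007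
--         # agrega el tiempo que ha pasado hasta resolver el ejercicio
--     return n, penalty
-- ===== SOURCE B (Python) =====
-- def solveProblems(n, givenTime, timeSolve):
--     # pass 1: full cumulative-sum sequence
--     cumulative = []
--     s = 0
--     for t in timeSolve:
--         s += t
--         cumulative.append(s)
--     # pass 2: first cumulative value strictly above givenTime
--     for j, c in enumerate(cumulative):
--         if c > givenTime:
--             return j, sum(cumulative[:j]) % 1000000007
--     return n, sum(cumulative) % 1000000007
-- ===== Notes on version B (the rewrite author's own statement) =====
-- stated objective: alternative
-- what changed: Replaces A's single fused loop (running total + per-step modded penalty accumulator, early return) with two explicit passes: build the full cumulative-sum list, locate the first cumulative value exceeding givenTime, and take one sum-then-mod of the relevant prefix of cumulative sums.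
import Mathlib
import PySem

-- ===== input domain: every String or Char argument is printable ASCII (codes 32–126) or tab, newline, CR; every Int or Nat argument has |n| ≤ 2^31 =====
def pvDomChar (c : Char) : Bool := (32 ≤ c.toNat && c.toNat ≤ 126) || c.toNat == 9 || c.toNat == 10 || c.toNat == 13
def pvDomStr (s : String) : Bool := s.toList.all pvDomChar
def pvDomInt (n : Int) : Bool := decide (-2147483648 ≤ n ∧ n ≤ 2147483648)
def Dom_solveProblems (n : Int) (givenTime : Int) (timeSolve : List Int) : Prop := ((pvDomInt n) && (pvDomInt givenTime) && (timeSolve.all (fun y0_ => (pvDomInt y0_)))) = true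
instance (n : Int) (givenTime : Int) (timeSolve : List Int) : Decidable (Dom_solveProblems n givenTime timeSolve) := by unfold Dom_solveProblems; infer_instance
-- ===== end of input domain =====

-- ===== PORT A =====
-- B builds the cumulative-sum list first, then finds the cutoff and sums a prefix of it (two passes, one mod); A fuses everything in one loop.
def solveAux (n : Int) (givenTime : Int) : List Int → Int → Int → Int → Int × Int
  | [], _, _, penalty => (n, penalty)
  | t :: rest, i, totalTime, penalty =>
    if totalTime + t > givenTime then (i, penalty)
    else solveAux n givenTime rest (i + 1) (totalTime + t)
           (PySem.Int.mod (penalty + (totalTime + t)) 1000000007)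

def solveProblems (n : Int) (givenTime : Int) (timeSolve : List Int) : Int × Int :=
  solveAux n givenTime timeSolve 0 0 0

-- ===== PORT B =====
-- pass 1 of Source B: cumulative sums
def cumul : List Int → Int → List Int
  | [], _ => []
  | t :: rest, s => (s + t) :: cumul rest (s + t)

-- pass 2 of Source B: index of the first cumulative value strictly above givenTime
def firstExceed (givenTime : Int) : List Int → Int → Option Int
  | [], _ => none
  | c :: rest, j => if c > givenTime then some j else firstExceed givenTime rest (j + 1)

def solveProblems_alt (n : Int) (givenTime : Int) (timeSolve : List Int) : Int × Int :=
  let cumulative := cumul timeSolve 0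
  match firstExceed givenTime cumulative 0 with
  | some j => (j, PySem.Int.mod (cumulative.take j.toNat).sum 1000000007)
  | none => (n, PySem.Int.mod cumulative.sum 1000000007)

-- ===== PRECONDITION & SPEC =====
def Spec_solveProblems (n : Int) (givenTime : Int) (timeSolve : List Int) (out : Int × Int) : Prop := out = solveProblems_alt n givenTime timeSolve
instance (n : Int) (givenTime : Int) (timeSolve : List Int) (out : Int × Int) : Decidable (Spec_solveProblems n givenTime timeSolve out) := by unfold Spec_solveProblems; infer_instance

-- ===== CLAIM (what is proved, stated in full; the proofs are below) =====
def Claim_equal_solveProblems : Prop := ∀ (n : Int) (givenTime : Int) (timeSolve : List Int), Dom_solveProblems n givenTime timeSolve → Spec_solveProblems n givenTime timeSolve (solveProblems n givenTime timeSolve)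

-- ===== LEMMAS AND PROOFS =====

theorem firstExceed_ge (givenTime : Int) (cs : List Int) (i j : Int)
    (h : firstExceed givenTime cs i = some j) : i ≤ j := by
  induction cs generalizing i with
  | nil => simp [firstExceed] at h
  | cons c rest ih =>
    simp only [firstExceed] at h
    split at h
    · cases h; exact le_refl _
    · have := ih (i + 1) h; omega

theorem solveAux_eq (n givenTime : Int) (ts : List Int) (i acc p : Int)
    (hp : PySem.Int.mod p 1000000007 = p) :
    solveAux n givenTime ts i acc p =
      match firstExceed givenTime (cumul ts acc) i with
      | some j => (j, PySem.Int.mod (p + ((cumul ts acc).take (j - i).toNat).sum) 1000000007)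
      | none => (n, PySem.Int.mod (p + (cumul ts acc).sum) 1000000007) := by
  induction ts generalizing i acc p with
  | nil =>
    simp [solveAux, cumul, firstExceed, PySem.Int.mod] at *
    omega
  | cons t rest ih =>
    simp only [solveAux, cumul, firstExceed]
    by_cases hgt : acc + t > givenTime
    · simp only [hgt, if_pos]
      have : (i - i).toNat = 0 := by omega
      simp [PySem.Int.mod] at *
      omega
    · simp only [hgt, if_neg, not_false_iff]
      have hp' : PySem.Int.mod (PySem.Int.mod (p + (acc + t)) 1000000007) 1000000007
          = PySem.Int.mod (p + (acc + t)) 1000000007 := by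
        simp [PySem.Int.mod]
      rw [ih (i + 1) (acc + t) _ hp']
      cases hfe : firstExceed givenTime (cumul rest (acc + t)) (i + 1) with
      | none =>
        simp only [List.sum_cons]
        congr 1
        simp [PySem.Int.mod]
        try ring_nf
      | some j =>
        have hij : i + 1 ≤ j := firstExceed_ge _ _ _ _ hfe
        have htn : (j - i).toNat = (j - (i + 1)).toNat + 1 := by omega
        simp only [htn, List.take_succ_cons, List.sum_cons]
        congr 1
        simp [PySem.Int.mod]
        try ring_nf

-- ===== VERDICT (by name: the statement is the Claim_ definition above) =====
theorem solveProblems_spec : Claim_equal_solveProblems := by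
  intro n givenTime timeSolve _
  unfold Spec_solveProblems solveProblems solveProblems_alt
  rw [solveAux_eq n givenTime timeSolve 0 0 0 (by simp [PySem.Int.mod])]
  cases hfe : firstExceed givenTime (cumul timeSolve 0) 0 with
  | none => simp only [hfe, Int.zero_add]
  | some j => simp only [hfe, Int.sub_zero, Int.zero_add]
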